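-- pv_equiv track=rewrite | github.com/jasonwu1993/RAG-GCS | src/core/search/engines/enhanced_search.py | _apply_facet_filters
-- ===== SOURCE A (Python) =====
-- from typing import Dict, List, Any, Optional, Tuple, Set
--
-- def _apply_facet_filters(results: List[Dict[str, Any]],
--                         facet_filters: Dict[str, List[str]]) -> List[Dict[str, Any]]:
--     """Apply facet filters to search results"""
--     filtered_results = []
--
--     for result in results:
--         facet_data = result.get("facet_data", {})
--         matches_all_filters = True
--
--         for facet_name, filter_values in facet_filters.items():
--             if facet_name in facet_data:
--                 if facet_data[facet_name] not in filter_values: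
--                     matches_all_filters = False
--                     break
--             else:
--                 # If facet data is missing, exclude by default
--                 matches_all_filters = False
--                 break
--
--         if matches_all_filters:
--             filtered_results.append(result)
--
--     return filtered_results
-- ===== SOURCE B (Python) =====
-- from typing import Dict, List, Any
--
-- def _apply_facet_filters(results: List[Dict[str, Any]],
--                         facet_filters: Dict[str, List[str]]) -> List[Dict[str, Any]]:
--     """Apply facet filters to search results (one narrowing pass per filter)."""
--     filtered = list(results)
--     for facet_name, filter_values in facet_filters.items():
--         filtered = [r for r in filtered
--                     if facet_name in (fd := r.get("facet_data", {}))
--                     and fd[facet_name] in filter_values]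
--     return filtered
-- ===== Notes on version B (the rewrite author's own statement) =====
-- stated objective: simpler
-- what changed: B inverts the loop nesting: instead of scanning each result against all filters with a flag and break, it starts from a copy of results and narrows it with one filter-comprehension per facet filter.
import Mathlib
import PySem

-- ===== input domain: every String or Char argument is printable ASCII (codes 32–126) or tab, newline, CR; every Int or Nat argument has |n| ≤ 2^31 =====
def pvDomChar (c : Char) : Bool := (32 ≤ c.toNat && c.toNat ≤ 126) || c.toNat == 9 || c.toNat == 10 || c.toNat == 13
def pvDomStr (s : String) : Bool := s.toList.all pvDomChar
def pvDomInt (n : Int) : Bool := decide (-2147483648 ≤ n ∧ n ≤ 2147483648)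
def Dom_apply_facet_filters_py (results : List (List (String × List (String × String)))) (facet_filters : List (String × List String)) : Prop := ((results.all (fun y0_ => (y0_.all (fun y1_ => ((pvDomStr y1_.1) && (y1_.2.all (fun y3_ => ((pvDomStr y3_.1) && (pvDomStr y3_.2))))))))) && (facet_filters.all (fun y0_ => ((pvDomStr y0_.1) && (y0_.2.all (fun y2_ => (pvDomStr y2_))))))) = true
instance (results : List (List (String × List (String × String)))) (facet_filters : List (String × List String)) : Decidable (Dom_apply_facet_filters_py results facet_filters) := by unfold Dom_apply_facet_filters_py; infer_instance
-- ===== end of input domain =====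

-- B replaces A's per-result scan (inner loop over filters with a break flag) by one narrowing
-- filter pass per facet filter, starting from a copy of results; same cost, simpler decomposition.

-- ===== PORT A =====
-- dict lookup on the assoc-list model: first pair with matching key
def pvLookup (d : List (String × String)) (k : String) : Option String :=
  (d.find? (fun p => p.1 == k)).map (·.2)

-- inner loop of A: 'for facet_name, filter_values in facet_filters.items(): … break'
def pvMatchesAll (facet_data : List (String × String)) : List (String × List String) → Bool
  | [] => true
  | (facet_name, filter_values) :: rest =>
    match pvLookup facet_data facet_name with
    | some v => if filter_values.contains v then pvMatchesAll facet_data rest else false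
    | none => false

def apply_facet_filters_py (results : List (List (String × List (String × String)))) (facet_filters : List (String × List String)) : List (List (String × List (String × String))) :=
  results.foldl (fun filtered_results result =>
    let facet_data := (((result.find? (fun p => p.1 == "facet_data")).map (·.2)).getD [])
    if pvMatchesAll facet_data facet_filters then filtered_results ++ [result]
    else filtered_results) []

-- ===== PORT B =====
def apply_facet_filters_py_alt (results : List (List (String × List (String × String)))) (facet_filters : List (String × List String)) : List (List (String × List (String × String))) :=
  facet_filters.foldl (fun filtered fv =>
    filtered.filter (fun r =>
      let fd := (((r.find? (fun p => p.1 == "facet_data")).map (·.2)).getD [])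
      match pvLookup fd fv.1 with
      | some v => fv.2.contains v
      | none => false)) results

-- ===== PRECONDITION & SPEC =====
def Spec_apply_facet_filters_py (results : List (List (String × List (String × String)))) (facet_filters : List (String × List String)) (out : List (List (String × List (String × String)))) : Prop := out = apply_facet_filters_py_alt results facet_filters
instance (results : List (List (String × List (String × String)))) (facet_filters : List (String × List String)) (out : List (List (String × List (String × String)))) : Decidable (Spec_apply_facet_filters_py results facet_filters out) := by unfold Spec_apply_facet_filters_py; infer_instance

-- ===== CLAIM (what is proved, stated in full; the proofs are below) =====
def Claim_equal_apply_facet_filters_py : Prop := ∀ (results : List (List (String × List (String × String)))) (facet_filters : List (String × List String)), Dom_apply_facet_filters_py results facet_filters → Spec_apply_facet_filters_py results facet_filters (apply_facet_filters_py results facet_filters)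

-- ===== LEMMAS AND PROOFS =====

-- ===== VERDICT (by name: the statement is the Claim_ definition above) =====
-- the Boolean predicate both programs decide for a single result
def pvKeep (fs : List (String × List String)) (r : List (String × List (String × String))) : Bool :=
  fs.all (fun fv =>
    match pvLookup (((r.find? (fun p => p.1 == "facet_data")).map (·.2)).getD []) fv.1 with
    | some v => fv.2.contains v
    | none => false)

theorem pvMatchesAll_eq_all (fd : List (String × String)) (fs : List (String × List String)) :
    pvMatchesAll fd fs = fs.all (fun fv =>
      match pvLookup fd fv.1 with
      | some v => fv.2.contains v
      | none => false) := by
  induction fs with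
  | nil => rfl
  | cons fv rest ih =>
    obtain ⟨n, vs⟩ := fv
    simp only [pvMatchesAll, List.all_cons, ih]
    cases pvLookup fd n with
    | none => rfl
    | some v => cases h : vs.contains v <;> simp [h]

theorem pvKeep_cons (fv : String × List String) (fs : List (String × List String)) (r : List (String × List (String × String))) :
    pvKeep (fv :: fs) r = ((match pvLookup (((r.find? (fun p => p.1 == "facet_data")).map (·.2)).getD []) fv.1 with
      | some v => fv.2.contains v
      | none => false) && pvKeep fs r) := by
  simp [pvKeep]

theorem portA_eq_filter (results : List (List (String × List (String × String)))) (fs : List (String × List String)) :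
    apply_facet_filters_py results fs = results.filter (pvKeep fs) := by
  unfold apply_facet_filters_py
  rw [PySem.List.foldl_append_if]
  simp only [List.nil_append, List.map_id_fun', id]
  apply List.filter_congr
  intro r _
  simp [pvMatchesAll_eq_all, pvKeep]

theorem portB_eq_filter (results : List (List (String × List (String × String)))) (fs : List (String × List String)) :
    apply_facet_filters_py_alt results fs = results.filter (pvKeep fs) := by
  unfold apply_facet_filters_py_alt
  induction fs generalizing results with
  | nil =>
    simp only [List.foldl_nil]
    exact (List.filter_eq_self.mpr (fun r _ => rfl)).symm
  | cons fv rest ih =>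
    simp only [List.foldl_cons, ih, List.filter_filter]
    apply List.filter_congr
    intro r _
    rw [pvKeep_cons]
    cases pvLookup (((r.find? (fun p => p.1 == "facet_data")).map (·.2)).getD []) fv.1 with
    | none => simp
    | some v => exact Bool.and_comm _ _

theorem apply_facet_filters_py_spec : Claim_equal_apply_facet_filters_py := by
  intro results fs _
  unfold Spec_apply_facet_filters_py
  rw [portA_eq_filter, portB_eq_filter]
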